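-- pv_equiv track=rewrite | github.com/Advait2211/cp_dsa | codeforces/div3r1032/q5.py | count_common_prefix
-- ===== SOURCE A (Python) =====
-- def count_common_prefix(a, b):
--     str_a, str_b = str(a), str(b)
--     count = 0
--     for digit_a, digit_b in zip(str_a, str_b):
--         if digit_a == digit_b:
--             count += 1
--         else:
--             break
--     return count
-- ===== SOURCE B (Python) =====
-- def count_common_prefix(a, b):
--     # Binary search for the largest k such that the first k characters agree.
--     sa, sb = str(a), str(b)
--     lo, hi = 0, min(len(sa), len(sb))
--     while lo < hi:
--         mid = (lo + hi + 1) // 2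
--         if sa[:mid] == sb[:mid]:
--             lo = mid
--         else:
--             hi = mid - 1
--     return lo
-- ===== Notes on version B (the rewrite author's own statement) =====
-- stated objective: alternative
-- what changed: A scans zip(str(a), str(b)) character by character with a break; B binary-searches the largest k with str(a)[:k] == str(b)[:k] using slice comparisons, with no character-level loop.
import Mathlib
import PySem

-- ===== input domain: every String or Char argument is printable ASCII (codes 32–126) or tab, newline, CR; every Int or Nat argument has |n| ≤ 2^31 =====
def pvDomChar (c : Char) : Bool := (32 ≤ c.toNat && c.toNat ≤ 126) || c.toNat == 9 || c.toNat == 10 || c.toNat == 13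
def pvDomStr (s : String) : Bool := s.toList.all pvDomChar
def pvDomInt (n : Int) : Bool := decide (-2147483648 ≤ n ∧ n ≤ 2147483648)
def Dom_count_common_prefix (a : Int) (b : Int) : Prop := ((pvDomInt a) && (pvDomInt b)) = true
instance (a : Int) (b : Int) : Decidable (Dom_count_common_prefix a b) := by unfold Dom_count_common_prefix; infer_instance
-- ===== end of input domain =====

-- B replaces A's digit-by-digit scan with a binary search on the prefix length (alternative decomposition, same cost here).

-- ===== PORT A =====
-- the for-loop over zip(str_a, str_b) with break, state = count
def pvLoopA : List (Char × Char) → Int → Int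
  | [], count => count
  | (da, db) :: rest, count => if da == db then pvLoopA rest (count + 1) else count

def count_common_prefix (a : Int) (b : Int) : Int :=
  pvLoopA ((PySem.Int.toStr a).toList.zip (PySem.Int.toStr b).toList) 0

-- ===== PORT B =====
-- the while-loop as a fuel-indexed recursion (fuel = initial hi - lo bounds the iteration count):
-- binary search for the largest k with sa[:k] == sb[:k]
def pvBsearch (sa sb : List Char) : Nat → Int → Int → Int
  | 0, lo, _ => lo
  | fuel + 1, lo, hi =>
    if lo < hi then
      let mid := PySem.Int.floordiv (lo + hi + 1) 2
      if PySem.List.slice sa none (some mid) == PySem.List.slice sb none (some mid) then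
        pvBsearch sa sb fuel mid hi
      else
        pvBsearch sa sb fuel lo (mid - 1)
    else lo

def count_common_prefix_alt (a : Int) (b : Int) : Int :=
  let sa := (PySem.Int.toStr a).toList
  let sb := (PySem.Int.toStr b).toList
  pvBsearch sa sb (min sa.length sb.length) 0 ((min sa.length sb.length : Nat) : Int)

-- ===== PRECONDITION & SPEC =====
def Spec_count_common_prefix (a : Int) (b : Int) (out : Int) : Prop := out = count_common_prefix_alt a b
instance (a : Int) (b : Int) (out : Int) : Decidable (Spec_count_common_prefix a b out) := by unfold Spec_count_common_prefix; infer_instance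

-- ===== CLAIM (what is proved, stated in full; the proofs are below) =====
def Claim_equal_count_common_prefix : Prop := ∀ (a : Int) (b : Int), Dom_count_common_prefix a b → Spec_count_common_prefix a b (count_common_prefix a b)

-- ===== LEMMAS AND PROOFS =====

/-- Reference: length of the longest common prefix of two char lists. -/
def pvLcp : List Char → List Char → Nat
  | x :: xs, y :: ys => if x = y then pvLcp xs ys + 1 else 0
  | _, _ => 0

theorem pvLcp_le_min : ∀ (xs ys : List Char), pvLcp xs ys ≤ min xs.length ys.length := by
  intro xs
  induction xs with
  | nil => intro ys; simp [pvLcp]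
  | cons x xs ih =>
    intro ys
    cases ys with
    | nil => simp [pvLcp]
    | cons y ys =>
      simp only [pvLcp, List.length_cons]
      split_ifs with h
      · have := ih ys; omega
      · omega

theorem pvLoopA_eq : ∀ (xs ys : List Char) (c : Int),
    pvLoopA (xs.zip ys) c = c + pvLcp xs ys := by
  intro xs
  induction xs with
  | nil => intro ys c; simp [pvLoopA, pvLcp]
  | cons x xs ih =>
    intro ys c
    cases ys with
    | nil => simp [pvLoopA, pvLcp]
    | cons y ys =>
      simp only [List.zip_cons_cons, pvLoopA, pvLcp]
      by_cases h : x = y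
      · simp [h, ih]; ring
      · simp [h]

theorem pvTake_eq_iff : ∀ (xs ys : List Char) (k : Nat), k ≤ min xs.length ys.length →
    (xs.take k = ys.take k ↔ k ≤ pvLcp xs ys) := by
  intro xs
  induction xs with
  | nil => intro ys k hk; simp at hk; simp [hk, pvLcp]
  | cons x xs ih =>
    intro ys k hk
    cases ys with
    | nil => simp at hk; simp [hk]
    | cons y ys =>
      cases k with
      | zero => simp
      | succ k =>
        simp only [List.take_succ_cons, pvLcp, List.length_cons] at *
        constructor
        · intro h
          have hxy : x = y := by
            have := congrArg (·.head?) h; simpa using this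
          have ht : xs.take k = ys.take k := by
            have := congrArg (·.tail) h; simpa using this
          have := (ih ys k (by omega)).mp ht
          simp [hxy]; omega
        · intro h
          split_ifs at h with hxy
          · have := (ih ys k (by omega)).mpr (by omega)
            simp [hxy, this]
          · omega

theorem pvBsearch_eq : ∀ (fuel : Nat) (sa sb : List Char) (lo hi : Int),
    (hi - lo).toNat ≤ fuel → 0 ≤ lo → lo ≤ (pvLcp sa sb : Int) → (pvLcp sa sb : Int) ≤ hi →
    hi ≤ (min sa.length sb.length : Nat) →
    pvBsearch sa sb fuel lo hi = pvLcp sa sb := by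
  intro fuel
  induction fuel with
  | zero =>
    intro sa sb lo hi hf h0 hlo hhi hmin
    simp only [pvBsearch]
    omega
  | succ f ih =>
    intro sa sb lo hi hf h0 hlo hhi hmin
    by_cases hlt : lo < hi
    · have hmid : PySem.Int.floordiv (lo + hi + 1) 2 = (lo + hi + 1) / 2 :=
        PySem.Int.floordiv_eq_ediv_of_pos (by omega)
      simp only [pvBsearch, if_pos hlt]
      by_cases heq : PySem.List.slice sa none (some (PySem.Int.floordiv (lo + hi + 1) 2))
          = PySem.List.slice sb none (some (PySem.Int.floordiv (lo + hi + 1) 2))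
      · rw [if_pos (by simpa using heq)]
        rw [PySem.List.slice_to sa (by omega), PySem.List.slice_to sb (by omega)] at heq
        have hk : ((lo + hi + 1) / 2).toNat ≤ min sa.length sb.length := by omega
        have hle := (pvTake_eq_iff sa sb ((lo + hi + 1) / 2).toNat hk).mp (by rw [← hmid]; exact heq)
        exact ih sa sb _ hi (by omega) (by omega) (by omega) hhi hmin
      · rw [if_neg (by simpa using heq)]
        rw [PySem.List.slice_to sa (by omega), PySem.List.slice_to sb (by omega)] at heq
        have hk : ((lo + hi + 1) / 2).toNat ≤ min sa.length sb.length := by omega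
        have hnle : ¬ (((lo + hi + 1) / 2).toNat ≤ pvLcp sa sb) := fun hle =>
          heq (by rw [hmid]; exact (pvTake_eq_iff sa sb ((lo + hi + 1) / 2).toNat hk).mpr hle)
        exact ih sa sb lo _ (by omega) h0 hlo (by omega) (by omega)
    · simp only [pvBsearch, if_neg hlt]
      omega

-- ===== VERDICT (by name: the statement is the Claim_ definition above) =====
theorem count_common_prefix_spec : Claim_equal_count_common_prefix := by
  intro a b _
  unfold Spec_count_common_prefix count_common_prefix count_common_prefix_alt
  rw [pvLoopA_eq, pvBsearch_eq]
  · omega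
  · omega
  · omega
  · exact_mod_cast Nat.zero_le _
  · exact_mod_cast pvLcp_le_min _ _
  · exact le_refl _
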